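-- pv_equiv track=rewrite | github.com/asher-ffig/BCC-UFABC | zeros_segment.py | zeros_segment
-- ===== SOURCE A (Python) =====
-- def zeros_segment(A:list) -> int:
--   mm = mi = mj = m = i = 0
--
--   for j in range(len(A)):
--         if A[j] == 0:
--             m += 1
--         else:
--             m = 0
--             i = j
--         if m > mm:
--             mm = m
--             mi = i + 1
--             mj = j
--
--   return(mm, mi, mj)
-- ===== SOURCE B (Python) =====
-- def zeros_segment(A):
--     best_len = best_start = best_end = 0
--     i = 0
--     n = len(A)
--     while i < n:
--         if A[i] != 0:
--             i += 1
--             continue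
--         j = i
--         while j < n and A[j] == 0:
--             j += 1
--         if j - i > best_len:
--             best_len, best_start, best_end = j - i, i, j - 1
--         i = j
--     return (best_len, best_start, best_end)
-- ===== Notes on version B (the rewrite author's own statement) =====
-- stated objective: alternative
-- what changed: Replaces A's per-element scan with counter/last-nonzero-index state by a run-based skip scan that measures each maximal zero run wholesale and records its true start index.
-- intended difference: On lists whose leading zero run is at least as long as every other zero run (so it wins), A reports start index 1 (its 'i+1' with the last-nonzero index i stuck at its initial 0) although the run starts at index 0; B reports the intended start index 0. — e.g. on zeros_segment([0, 0, 1, 0]): A returns (2, 1, 1), B returns (2, 0, 1)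
import Mathlib
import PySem

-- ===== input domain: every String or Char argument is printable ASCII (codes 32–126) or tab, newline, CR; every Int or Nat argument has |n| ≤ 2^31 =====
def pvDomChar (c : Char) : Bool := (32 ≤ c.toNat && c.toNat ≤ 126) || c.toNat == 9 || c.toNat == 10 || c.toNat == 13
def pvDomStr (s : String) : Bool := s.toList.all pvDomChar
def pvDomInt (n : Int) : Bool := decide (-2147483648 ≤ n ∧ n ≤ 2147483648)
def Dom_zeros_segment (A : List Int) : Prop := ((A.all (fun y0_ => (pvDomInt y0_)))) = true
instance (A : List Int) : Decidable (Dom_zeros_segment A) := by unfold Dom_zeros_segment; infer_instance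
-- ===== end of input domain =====

-- B replaces A's per-element counter scan by a run-based skip scan and reports the true
-- start index of the winning zero run (objective: alternative; return values differ only
-- on the D_ corner stated below).

-- ===== PORT A =====
-- state (mm, mi, mj, m, i); 'for j in range(len(A))' with A[j] becomes recursion over the
-- list elements carrying the index j.
def zsLoopA : List Int → Int → Int × Int × Int × Int × Int → Int × Int × Int × Int × Int
  | [], _, st => st
  | a :: rest, j, (mm, mi, mj, m, i) =>
    let p : Int × Int := if a = 0 then (m + 1, i) else (0, j)
    let st' : Int × Int × Int × Int × Int :=
      if p.1 > mm then (p.1, p.2 + 1, j, p.1, p.2) else (mm, mi, mj, p.1, p.2)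
    zsLoopA rest (j + 1) st'

def zeros_segment (A : List Int) : Int × Int × Int :=
  let st := zsLoopA A 0 (0, 0, 0, 0, 0)
  (st.1, st.2.1, st.2.2.1)

-- ===== PORT B =====
-- inner 'while j < n and A[j] == 0' of Source B: length of the zero prefix
def zsRunLen : List Int → Nat
  | [] => 0
  | x :: xs => if x = 0 then zsRunLen xs + 1 else 0

-- outer while loop of Source B: skip a nonzero element, or consume a whole zero run
def zsGoB : List Int → Int → Int × Int × Int → Int × Int × Int
  | [], _, best => best
  | x :: xs, pos, best =>
    if h : x = 0 then
      let L := zsRunLen (x :: xs)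
      let best' := if (L : Int) > best.1 then ((L : Int), pos, pos + (L : Int) - 1) else best
      zsGoB ((x :: xs).drop L) (pos + (L : Int)) best'
    else
      zsGoB xs (pos + 1) best
termination_by l => l.length
decreasing_by
  · simp only [zsRunLen, if_pos h, List.drop_succ_cons]
    have : (List.drop (zsRunLen xs) xs).length = xs.length - zsRunLen xs := by simp
    simp only [List.length_cons]; omega
  · simp

def zeros_segment_alt (A : List Int) : Int × Int × Int := zsGoB A 0 (0, 0, 0)

-- ===== PRECONDITION & SPEC =====
-- On lists whose leading zero run is at least as long as every other contiguous zero run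
-- (so it is the first-winning longest run), A reports start index 1 (its 'i+1' with the
-- last-nonzero index i stuck at its initial 0) although the run starts at index 0; B reports
-- the intended start index 0.
def D_zeros_segment (A : List Int) : Prop :=
  A.getD 0 1 = 0 ∧
    ∀ L ≤ A.length, (∃ i ≤ A.length, i + L ≤ A.length ∧ ∀ k < L, A.getD (i + k) 1 = 0) →
      ∀ k < L, A.getD k 1 = 0
instance (A : List Int) : Decidable (D_zeros_segment A) := by unfold D_zeros_segment; infer_instance

def Spec_zeros_segment (A : List Int) (out : Int × Int × Int) : Prop :=
  ¬ D_zeros_segment A → out = zeros_segment_alt A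
instance (A : List Int) (out : Int × Int × Int) : Decidable (Spec_zeros_segment A out) := by unfold Spec_zeros_segment; infer_instance

def pvDiffWitness_zeros_segment : List Int := [0, 0, 1, 0]
def pvDiffWitnessOut_zeros_segment : (Int × Int × Int) × (Int × Int × Int) := ((2, 1, 1), (2, 0, 1))

-- ===== CLAIM (what is proved, stated in full; the proofs are below) =====
def Claim_unchanged_zeros_segment : Prop := ∀ (A : List Int), Dom_zeros_segment A → Spec_zeros_segment A (zeros_segment A)
def Claim_changed_zeros_segment : Prop := Dom_zeros_segment (pvDiffWitness_zeros_segment) ∧ D_zeros_segment (pvDiffWitness_zeros_segment) ∧ zeros_segment (pvDiffWitness_zeros_segment) = pvDiffWitnessOut_zeros_segment.1 ∧ zeros_segment_alt (pvDiffWitness_zeros_segment) = pvDiffWitnessOut_zeros_segment.2 ∧ pvDiffWitnessOut_zeros_segment.1 ≠ pvDiffWitnessOut_zeros_segment.2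
def Claim_exact_zeros_segment : Prop := ∀ (A : List Int), Dom_zeros_segment A → D_zeros_segment A → zeros_segment A ≠ zeros_segment_alt A

-- ===== LEMMAS AND PROOFS =====

-- length of the longest contiguous zero run anywhere in the list (proof-side helper)
def zsMaxRun : List Int → Nat
  | [] => 0
  | x :: xs => max (zsRunLen (x :: xs)) (zsMaxRun xs)

theorem zsMaxRun_cons (x : Int) (xs : List Int) :
    zsMaxRun (x :: xs) = max (zsRunLen (x :: xs)) (zsMaxRun xs) := rfl

-- every position below the zero-prefix length holds a zero
theorem zsRunLen_getD (A : List Int) : ∀ k < zsRunLen A, A.getD k 1 = 0 := by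
  induction A with
  | nil => intro k hk; simp [zsRunLen] at hk
  | cons x xs ih =>
    intro k hk
    by_cases hx : x = 0
    · subst hx
      cases k with
      | zero => simp
      | succ m =>
        simp only [zsRunLen, reduceIte] at hk
        simpa using ih m (by omega)
    · simp [zsRunLen, hx] at hk

-- a block of zeros at the front is at most the zero-prefix length
theorem zsRunLen_ge (A : List Int) : ∀ (L : Nat), L ≤ A.length →
    (∀ k < L, A.getD k 1 = 0) → L ≤ zsRunLen A := by
  induction A with
  | nil => intro L hL _; simp only [List.length_nil] at hL; omega
  | cons x xs ih =>
    intro L hL hz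
    cases L with
    | zero => omega
    | succ M =>
      have hx : x = 0 := by simpa using hz 0 (by omega)
      subst hx
      have : M ≤ zsRunLen xs := by
        refine ih M (by simpa using hL) ?_
        intro k hk
        simpa using hz (k + 1) (by omega)
      simp only [zsRunLen, reduceIte]
      omega

-- somewhere in the list there is a zero block of length zsMaxRun
theorem zsMaxRun_exists (A : List Int) :
    ∃ i, i + zsMaxRun A ≤ A.length ∧ ∀ k < zsMaxRun A, A.getD (i + k) 1 = 0 := by
  induction A with
  | nil => exact ⟨0, by simp [zsMaxRun]⟩
  | cons x xs ih =>
    rw [zsMaxRun_cons]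
    by_cases hc : zsMaxRun xs ≤ zsRunLen (x :: xs)
    · refine ⟨0, ?_, ?_⟩
      · have : zsRunLen (x :: xs) ≤ (x :: xs).length := by
          clear hc ih
          induction (x :: xs) with
          | nil => simp [zsRunLen]
          | cons y ys ihy =>
            by_cases hy : y = 0
            · subst hy; simp only [zsRunLen, reduceIte, List.length_cons]; omega
            · simp [zsRunLen, hy]
        omega
      · intro k hk
        simpa using zsRunLen_getD (x :: xs) k (by omega)
    · obtain ⟨i, hi1, hi2⟩ := ih
      refine ⟨i + 1, by simp; omega, ?_⟩
      intro k hk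
      have : (i + 1 + k) = (i + k) + 1 := by omega
      rw [this, List.getD_cons_succ]
      exact hi2 k (by omega)

-- a zero block anywhere has length at most zsMaxRun
theorem zsMaxRun_ge (A : List Int) : ∀ (i L : Nat), i + L ≤ A.length →
    (∀ k < L, A.getD (i + k) 1 = 0) → L ≤ zsMaxRun A := by
  induction A with
  | nil => intro i L h _; simp at h; omega
  | cons x xs ih =>
    intro i L h hz
    cases i with
    | zero =>
      have h1 : L ≤ zsRunLen (x :: xs) := by
        refine zsRunLen_ge (x :: xs) L (by simpa using h) ?_
        intro k hk; simpa using hz k hk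
      rw [zsMaxRun_cons]; omega
    | succ j =>
      have h1 : L ≤ zsMaxRun xs := by
        refine ih j L (by simp at h; omega) ?_
        intro k hk
        have := hz k hk
        have e : (j + 1 + k) = (j + k) + 1 := by omega
        rw [e, List.getD_cons_succ] at this
        exact this
      rw [zsMaxRun_cons]; omega

-- the declarative change region coincides with the run-length characterisation
theorem zsD_iff (A : List Int) :
    D_zeros_segment A ↔ (0 < zsRunLen A ∧ zsMaxRun A = zsRunLen A) := by
  constructor
  · rintro ⟨h0, hall⟩
    have hne : A ≠ [] := by intro h; subst h; simp at h0
    have hp : 0 < zsRunLen A := by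
      cases A with
      | nil => simp at h0
      | cons x xs =>
        simp only [List.getD_cons_zero] at h0
        simp [zsRunLen, h0]
    refine ⟨hp, ?_⟩
    obtain ⟨i, hi1, hi2⟩ := zsMaxRun_exists A
    have hm : ∀ k < zsMaxRun A, A.getD k 1 = 0 :=
      hall (zsMaxRun A) (by omega) ⟨i, by omega, by omega, hi2⟩
    have h1 : zsMaxRun A ≤ zsRunLen A := zsRunLen_ge A (zsMaxRun A) (by omega) hm
    have h2 : zsRunLen A ≤ zsMaxRun A := by
      cases A with
      | nil => simp [zsRunLen, zsMaxRun]
      | cons x xs => rw [zsMaxRun_cons]; omega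
    omega
  · rintro ⟨hp, hmax⟩
    constructor
    · cases A with
      | nil => simp [zsRunLen] at hp
      | cons x xs =>
        by_cases hx : x = 0
        · simp [hx]
        · simp [zsRunLen, hx] at hp
    · intro L hL ⟨i, _, hiL, hz⟩ k hk
      have h1 : L ≤ zsMaxRun A := zsMaxRun_ge A i L hiL hz
      exact zsRunLen_getD A k (by omega)

theorem zsRunLen_le_maxRun (l : List Int) : zsRunLen l ≤ zsMaxRun l := by
  cases l with
  | nil => simp [zsRunLen, zsMaxRun]
  | cons x xs => rw [zsMaxRun_cons]; exact le_max_left _ _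

theorem zsMaxRun_tail_le (x : Int) (xs : List Int) : zsMaxRun xs ≤ zsMaxRun (x :: xs) := by
  rw [zsMaxRun_cons]; exact le_max_right _ _

-- a list with zero prefix of length L splits as replicate L 0 ++ rest, rest not starting with 0
theorem zsRunLen_split (l : List Int) :
    l = List.replicate (zsRunLen l) 0 ++ l.drop (zsRunLen l) ∧
      (l.drop (zsRunLen l) = [] ∨ ∃ y t, l.drop (zsRunLen l) = y :: t ∧ y ≠ 0) := by
  induction l with
  | nil => simp [zsRunLen]
  | cons x xs ih =>
    by_cases hx : x = 0
    · subst hx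
      have h1 : zsRunLen ((0:Int) :: xs) = zsRunLen xs + 1 := by simp [zsRunLen]
      rw [h1]
      simp only [List.replicate_succ, List.drop_succ_cons, List.cons_append]
      exact ⟨by rw [← ih.1], ih.2⟩
    · refine ⟨?_, Or.inr ⟨x, xs, ?_, hx⟩⟩ <;> simp [zsRunLen, hx]

theorem zsRunLen_replicate (k : Nat) : zsRunLen (List.replicate k (0 : Int)) = k := by
  induction k with
  | zero => simp [zsRunLen]
  | succ m ihm => simp [List.replicate_succ, zsRunLen, ihm]

theorem zsMaxRun_replicate (L : Nat) : zsMaxRun (List.replicate L 0) = L := by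
  induction L with
  | zero => simp [zsMaxRun]
  | succ n ih =>
    rw [List.replicate_succ, zsMaxRun_cons, ← List.replicate_succ, zsRunLen_replicate, ih]
    omega

theorem zsRunLen_append_nonzero (L : Nat) (y : Int) (t : List Int) (hy : y ≠ 0) :
    zsRunLen (List.replicate L 0 ++ y :: t) = L := by
  induction L with
  | zero => simp [zsRunLen, hy]
  | succ n ih => simp [List.replicate_succ, zsRunLen, ih]

theorem zsMaxRun_decomp (L : Nat) (y : Int) (t : List Int) (hy : y ≠ 0) :
    zsMaxRun (List.replicate L 0 ++ y :: t) = max L (zsMaxRun t) := by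
  induction L with
  | zero => simp [zsMaxRun_cons, zsRunLen, hy]
  | succ n ih =>
    have := zsRunLen_append_nonzero (n + 1) y t hy
    simp only [List.replicate_succ, List.cons_append] at *
    rw [zsMaxRun_cons, ih, this]
    omega

-- A's loop over a block of L zeros, with invariants 0 ≤ m ≤ mm
theorem zsLoopA_zrun (L : Nat) (rest : List Int) (j mm mi mj m i : Int)
    (hm0 : 0 ≤ m) (hm : m ≤ mm) :
    zsLoopA (List.replicate L 0 ++ rest) j (mm, mi, mj, m, i)
      = zsLoopA rest (j + L)
          (if m + L > mm then (m + L, i + 1, j + L - 1, m + L, i) else (mm, mi, mj, m + L, i)) := by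
  induction L generalizing j mm mi mj m with
  | zero =>
    simp only [List.replicate_zero, List.nil_append, Nat.cast_zero, add_zero]
    rw [if_neg (by omega)]
  | succ n ih =>
    simp only [List.replicate_succ, List.cons_append, zsLoopA, reduceIte]
    by_cases h1 : m + 1 > mm
    · rw [if_pos (by simpa using h1)]
      rw [ih (j + 1) (m + 1) (i + 1) j (m + 1) (by omega) (by omega)]
      have hcond : m + (↑(n + 1) : Int) > mm := by push_cast; omega
      rw [if_pos hcond]
      by_cases h2 : (0 : Int) < n
      · rw [if_pos (by omega)]
        congr 1 <;> push_cast <;> ring_nf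
      · have hn : n = 0 := by omega
        subst hn
        rw [if_neg (by omega)]
        push_cast; ring_nf
    · rw [if_neg (by simpa using h1)]
      rw [ih (j + 1) mm mi mj (m + 1) (by omega) (by omega)]
      have : m + 1 + (n : Int) = m + (↑(n + 1) : Int) := by push_cast; ring
      by_cases h2 : m + 1 + (n : Int) > mm
      · rw [if_pos h2, if_pos (by omega)]
        congr 1 <;> push_cast <;> ring_nf
      · rw [if_neg h2, if_neg (by push_cast at h2 ⊢; omega)]
        have e1 : j + 1 + (n : Int) = j + ((n + 1 : Nat) : Int) := by push_cast; ring
        have e2 : m + 1 + (n : Int) = m + ((n + 1 : Nat) : Int) := by push_cast; ring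
        rw [e1, e2]

-- single-step unfolding lemmas for the two loops
theorem zsLoopA_step_nonzero (a : Int) (ha : a ≠ 0) (rest : List Int) (j mm mi mj m i : Int) :
    zsLoopA (a :: rest) j (mm, mi, mj, m, i) =
      zsLoopA rest (j + 1) (if 0 > mm then (0, j + 1, j, 0, j) else (mm, mi, mj, 0, j)) := by
  simp only [zsLoopA, if_neg ha]

theorem zsGoB_nil (pos : Int) (best : Int × Int × Int) : zsGoB [] pos best = best := by
  rw [zsGoB]

theorem zsGoB_step_nonzero (x : Int) (hx : x ≠ 0) (xs : List Int) (pos : Int)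
    (best : Int × Int × Int) : zsGoB (x :: xs) pos best = zsGoB xs (pos + 1) best := by
  rw [zsGoB]; simp [hx]

theorem zsGoB_step_zero (xs : List Int) (pos : Int) (best : Int × Int × Int) :
    zsGoB ((0 : Int) :: xs) pos best =
      zsGoB (List.drop (zsRunLen ((0 : Int) :: xs)) ((0 : Int) :: xs))
        (pos + (zsRunLen ((0 : Int) :: xs) : Int))
        (if ((zsRunLen ((0 : Int) :: xs) : Int)) > best.1
          then ((zsRunLen ((0 : Int) :: xs) : Int), pos, pos + (zsRunLen ((0 : Int) :: xs) : Int) - 1)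
          else best) := by
  rw [zsGoB]; simp

-- main simulation: A's per-element loop equals B's run-skip loop, given the position
-- invariant i + 1 = j; the best triples may differ as long as a longer run is still ahead.
theorem zs_main (n : Nat) : ∀ (rest : List Int), rest.length ≤ n →
    ∀ (j mm mi mj mi' mj' i : Int), 0 ≤ mm → i + 1 = j →
    ((mi = mi' ∧ mj = mj') ∨ ((zsMaxRun rest : Int) > mm)) →
    ((zsLoopA rest j (mm, mi, mj, 0, i)).1, (zsLoopA rest j (mm, mi, mj, 0, i)).2.1,
      (zsLoopA rest j (mm, mi, mj, 0, i)).2.2.1) = zsGoB rest j (mm, mi', mj') := by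
  induction n with
  | zero =>
    intro rest hlen j mm mi mj mi' mj' i hmm hij hflag
    have : rest = [] := List.eq_nil_of_length_eq_zero (by omega)
    subst this
    rw [zsGoB_nil]
    rcases hflag with ⟨h1, h2⟩ | h
    · simp [zsLoopA, h1, h2]
    · simp [zsMaxRun] at h; omega
  | succ n ih =>
    intro rest hlen j mm mi mj mi' mj' i hmm hij hflag
    cases rest with
    | nil =>
      rw [zsGoB_nil]
      rcases hflag with ⟨h1, h2⟩ | h
      · simp [zsLoopA, h1, h2]
      · simp [zsMaxRun] at h; omega
    | cons x xs =>
      by_cases hx : x = 0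
      · -- zero run of length L ≥ 1 at the front
        subst hx
        obtain ⟨hsplit, hrest⟩ := zsRunLen_split ((0 : Int) :: xs)
        set L := zsRunLen ((0 : Int) :: xs) with hL
        have hL1 : 1 ≤ L := by simp [hL, zsRunLen]
        rw [zsGoB_step_zero, ← hL]
        conv_lhs => rw [hsplit]
        rw [zsLoopA_zrun L (List.drop L ((0 : Int) :: xs)) j mm mi mj 0 i le_rfl hmm]
        simp only [zero_add]
        rcases hrest with hnil | ⟨y, t, hyt, hy⟩
        · -- list is exactly the zero run
          rw [hnil, zsGoB_nil]
          have hmr : zsMaxRun ((0 : Int) :: xs) = L := by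
            conv_lhs => rw [hsplit, hnil]
            simpa using zsMaxRun_replicate L
          by_cases hgt : (L : Int) > mm
          · rw [if_pos hgt, if_pos hgt]
            simp [zsLoopA, hij]
          · rw [if_neg hgt, if_neg hgt]
            rcases hflag with ⟨h1, h2⟩ | h
            · simp [zsLoopA, h1, h2]
            · rw [hmr] at h; omega
        · -- a nonzero element follows the run
          rw [hyt]
          have hmr : zsMaxRun ((0 : Int) :: xs) = max L (zsMaxRun t) := by
            conv_lhs => rw [hsplit, hyt]
            exact zsMaxRun_decomp L y t hy
          have hlen'' : t.length ≤ n := by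
            have h1 : (List.drop L ((0 : Int) :: xs)).length = xs.length + 1 - L := by simp
            rw [hyt] at h1
            simp only [List.length_cons] at h1 hlen ⊢
            omega
          rw [zsGoB_step_nonzero y hy]
          by_cases hgt : (L : Int) > mm
          · rw [if_pos hgt, if_pos hgt]
            rw [zsLoopA_step_nonzero y hy, if_neg (by omega)]
            have := ih t hlen'' (j + L + 1) (L : Int) (i + 1) (j + L - 1) j (j + L - 1) (j + L)
              (by omega) (by ring) (Or.inl ⟨by omega, rfl⟩)
            simpa using this
          · rw [if_neg hgt, if_neg hgt]
            rw [zsLoopA_step_nonzero y hy, if_neg (by omega)]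
            refine ih t hlen'' (j + L + 1) mm mi mj mi' mj' (j + L) hmm (by ring) ?_
            rcases hflag with ⟨h1, h2⟩ | h
            · exact Or.inl ⟨h1, h2⟩
            · rw [hmr] at h
              right
              have hLmm : (L : Int) ≤ mm := by omega
              push_cast at h ⊢
              omega
      · -- nonzero head: both advance one element
        rw [zsLoopA_step_nonzero x hx, if_neg (by omega), zsGoB_step_nonzero x hx]
        refine ih xs (by simpa using Nat.lt_succ_iff.mp (by simpa using hlen)) (j + 1) mm mi mj
          mi' mj' j hmm rfl ?_
        rcases hflag with ⟨h1, h2⟩ | h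
        · exact Or.inl ⟨h1, h2⟩
        · right
          rw [zsMaxRun_cons] at h
          simp only [zsRunLen, if_neg hx] at h
          simpa using h

-- inside D_: A never updates after the prefix run (element-wise invariant)
theorem zsLoopA_noupd (rest : List Int) : ∀ (j mm mi mj m i : Int), 0 ≤ m →
    m + (zsRunLen rest : Int) ≤ mm → (zsMaxRun rest : Int) ≤ mm →
    zsLoopA rest j (mm, mi, mj, m, i)
      = (mm, mi, mj, (zsLoopA rest j (mm, mi, mj, m, i)).2.2.2.1,
          (zsLoopA rest j (mm, mi, mj, m, i)).2.2.2.2) := by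
  induction rest with
  | nil => intro j mm mi mj m i _ _ _; simp [zsLoopA]
  | cons x xs ih =>
    intro j mm mi mj m i hm0 hrun hmax
    have hmx : (zsMaxRun xs : Int) ≤ mm := by
      have h1 := zsMaxRun_tail_le x xs
      have h2 : (zsMaxRun xs : Int) ≤ (zsMaxRun (x :: xs) : Int) := by exact_mod_cast h1
      omega
    by_cases hx : x = 0
    · subst hx
      have hrl : zsRunLen ((0 : Int) :: xs) = zsRunLen xs + 1 := by simp [zsRunLen]
      rw [hrl] at hrun
      simp only [zsLoopA, reduceIte]
      rw [if_neg (show ¬ ((m + 1, i).1 > mm) by simp; push_cast at hrun; omega)]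
      exact ih (j + 1) mm mi mj (m + 1) i (by omega) (by push_cast at hrun ⊢; omega) hmx
    · have hrx : (zsRunLen xs : Int) ≤ mm := by
        have h1 := zsRunLen_le_maxRun xs
        have h2 : (zsRunLen xs : Int) ≤ (zsMaxRun xs : Int) := by exact_mod_cast h1
        omega
      rw [zsLoopA_step_nonzero x hx, if_neg (by omega)]
      exact ih (j + 1) mm mi mj 0 j le_rfl (by omega) hmx

-- inside D_: B never updates after the prefix run
theorem zsGoB_noupd (n : Nat) : ∀ (rest : List Int), rest.length ≤ n →
    ∀ (j : Int) (best : Int × Int × Int), (zsMaxRun rest : Int) ≤ best.1 →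
    zsGoB rest j best = best := by
  induction n with
  | zero =>
    intro rest hlen j best _
    have : rest = [] := List.eq_nil_of_length_eq_zero (by omega)
    subst this; exact zsGoB_nil j best
  | succ n ih =>
    intro rest hlen j best hmax
    cases rest with
    | nil => exact zsGoB_nil j best
    | cons x xs =>
      by_cases hx : x = 0
      · subst hx
        obtain ⟨hsplit, hrest⟩ := zsRunLen_split ((0 : Int) :: xs)
        set L := zsRunLen ((0 : Int) :: xs) with hL
        have hL1 : 1 ≤ L := by simp [hL, zsRunLen]
        have hLle : (L : Int) ≤ best.1 := by
          have h1 := zsRunLen_le_maxRun ((0 : Int) :: xs)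
          have h2 : (L : Int) ≤ (zsMaxRun ((0 : Int) :: xs) : Int) := by
            rw [hL]; exact_mod_cast h1
          omega
        rw [zsGoB_step_zero, ← hL, if_neg (by omega)]
        rcases hrest with hnil | ⟨y, t, hyt, hy⟩
        · rw [hnil]; exact zsGoB_nil _ best
        · rw [hyt, zsGoB_step_nonzero y hy]
          have hmr : zsMaxRun ((0 : Int) :: xs) = max L (zsMaxRun t) := by
            conv_lhs => rw [hsplit, hyt]
            exact zsMaxRun_decomp L y t hy
          have hlen'' : t.length ≤ n := by
            have h1 : (List.drop L ((0 : Int) :: xs)).length = xs.length + 1 - L := by simp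
            rw [hyt] at h1
            simp only [List.length_cons] at h1 hlen ⊢
            omega
          refine ih t hlen'' (j + L + 1) best ?_
          rw [hmr] at hmax
          push_cast at hmax ⊢
          omega
      · rw [zsGoB_step_nonzero x hx]
        refine ih xs (by simpa using Nat.lt_succ_iff.mp (by simpa using hlen)) (j + 1) best ?_
        rw [zsMaxRun_cons] at hmax
        push_cast at hmax
        omega

-- exact values of both programs inside D_
theorem zs_inside_D (A : List Int) (hD : D_zeros_segment A) :
    zeros_segment A = ((zsRunLen A : Int), 1, (zsRunLen A : Int) - 1) ∧
    zeros_segment_alt A = ((zsRunLen A : Int), 0, (zsRunLen A : Int) - 1) := by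
  obtain ⟨hp, hmax⟩ := (zsD_iff A).mp hD
  cases A with
  | nil => simp [zsRunLen] at hp
  | cons x xs =>
    have hx : x = 0 := by
      by_contra hx
      simp [zsRunLen, hx] at hp
    subst hx
    obtain ⟨hsplit, hrest⟩ := zsRunLen_split ((0 : Int) :: xs)
    set L := zsRunLen ((0 : Int) :: xs) with hL
    constructor
    · -- A's side
      unfold zeros_segment
      conv_lhs => rw [hsplit]
      rw [zsLoopA_zrun L (List.drop L ((0 : Int) :: xs)) 0 0 0 0 0 0 le_rfl le_rfl]
      rw [if_pos (by omega)]
      simp only [zero_add]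
      rcases hrest with hnil | ⟨y, t, hyt, hy⟩
      · rw [hnil]; simp [zsLoopA]
      · rw [hyt, zsLoopA_step_nonzero y hy, if_neg (by omega)]
        have hmr : zsMaxRun ((0 : Int) :: xs) = max L (zsMaxRun t) := by
          conv_lhs => rw [hsplit, hyt]
          exact zsMaxRun_decomp L y t hy
        rw [hmr] at hmax
        have hmt : (zsMaxRun t : Int) ≤ (L : Int) := by
          have : zsMaxRun t ≤ L := by omega
          exact_mod_cast this
        have hrt : (zsRunLen t : Int) ≤ (L : Int) := by
          have h1 := zsRunLen_le_maxRun t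
          have h2 : (zsRunLen t : Int) ≤ (zsMaxRun t : Int) := by exact_mod_cast h1
          omega
        rw [zsLoopA_noupd t ((L : Int) + 1) (L : Int) 1 ((L : Int) - 1) 0 (L : Int) le_rfl
          (by omega) hmt]
    · -- B's side
      unfold zeros_segment_alt
      rw [zsGoB_step_zero, ← hL]
      rw [if_pos (by omega)]
      simp only [zero_add]
      rcases hrest with hnil | ⟨y, t, hyt, hy⟩
      · rw [hnil]; exact zsGoB_nil _ _
      · rw [hyt, zsGoB_step_nonzero y hy]
        have hmr : zsMaxRun ((0 : Int) :: xs) = max L (zsMaxRun t) := by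
          conv_lhs => rw [hsplit, hyt]
          exact zsMaxRun_decomp L y t hy
        rw [hmr] at hmax
        refine zsGoB_noupd t.length t le_rfl ((L : Int) + 1) ((L : Int), 0, (L : Int) - 1) ?_
        have : zsMaxRun t ≤ L := by omega
        simpa using (by exact_mod_cast this : (zsMaxRun t : Int) ≤ (L : Int))

-- ===== VERDICT (by name: the statement is the Claim_ definition above) =====
theorem zeros_segment_spec : Claim_unchanged_zeros_segment := by
  intro A _ hD
  replace hD : 0 < zsRunLen A → zsMaxRun A ≠ zsRunLen A :=
    fun h1 h2 => hD ((zsD_iff A).mpr ⟨h1, h2⟩)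
  unfold zeros_segment zeros_segment_alt
  cases A with
  | nil => simp [zsLoopA, zsGoB_nil]
  | cons x xs =>
    by_cases hx : x = 0
    · -- prefix run exists but a strictly longer run occurs later
      subst hx
      have hp : 0 < zsRunLen ((0 : Int) :: xs) := by simp [zsRunLen]
      have hne := hD hp
      have hge := zsRunLen_le_maxRun ((0 : Int) :: xs)
      have hgt : zsRunLen ((0 : Int) :: xs) < zsMaxRun ((0 : Int) :: xs) := by omega
      obtain ⟨hsplit, hrest⟩ := zsRunLen_split ((0 : Int) :: xs)
      set L := zsRunLen ((0 : Int) :: xs) with hL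
      conv_lhs => rw [hsplit]
      rw [zsLoopA_zrun L (List.drop L ((0 : Int) :: xs)) 0 0 0 0 0 0 le_rfl le_rfl]
      rw [if_pos (by omega)]
      rw [zsGoB_step_zero, ← hL]
      rw [if_pos (by omega)]
      simp only [zero_add]
      rcases hrest with hnil | ⟨y, t, hyt, hy⟩
      · exfalso
        have : zsMaxRun ((0 : Int) :: xs) = L := by
          conv_lhs => rw [hsplit, hnil]
          simpa using zsMaxRun_replicate L
        omega
      · rw [hyt, zsLoopA_step_nonzero y hy, if_neg (by omega), zsGoB_step_nonzero y hy]
        have hmr : zsMaxRun ((0 : Int) :: xs) = max L (zsMaxRun t) := by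
          conv_lhs => rw [hsplit, hyt]
          exact zsMaxRun_decomp L y t hy
        have hmt : L < zsMaxRun t := by omega
        exact zs_main t.length t le_rfl ((L : Int) + 1) (L : Int) 1 ((L : Int) - 1) 0
          ((L : Int) - 1) (L : Int) (by positivity) (by ring)
          (Or.inr (by exact_mod_cast hmt))
    · -- first element nonzero: one lockstep step, then the main simulation
      rw [zsLoopA_step_nonzero x hx, if_neg (by omega), zsGoB_step_nonzero x hx]
      exact zs_main xs.length xs le_rfl 1 0 0 0 0 0 0 le_rfl rfl (Or.inl ⟨rfl, rfl⟩)

theorem zeros_segment_changed : Claim_changed_zeros_segment := by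
  unfold Claim_changed_zeros_segment
  refine ⟨by decide, by decide, by decide, ?_, by decide⟩
  show zsGoB [0, 0, 1, 0] 0 (0, 0, 0) = (2, 0, 1)
  rw [zsGoB_step_zero]
  norm_num [zsRunLen]
  rw [zsGoB_step_nonzero 1 (by norm_num), zsGoB_step_zero]
  norm_num [zsRunLen]
  rw [zsGoB_nil]

theorem zeros_segment_tight : Claim_exact_zeros_segment := by
  intro A _ hD
  obtain ⟨hA, hB⟩ := zs_inside_D A hD
  rw [hA, hB]
  intro h
  have h2 := congrArg (fun p => p.2.1) h
  simp at h2
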